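-- pv_equiv track=rewrite | github.com/vips-k/SoftwareQuality | scripts/prepare_allure_results.py | compute_aggregated_status
-- ===== SOURCE A (Python) =====
-- def compute_aggregated_status(child_steps):
--     if not child_steps:
--         return None
--     priority = ['failed', 'broken', 'skipped', 'passed', 'unknown']
--     child_statuses = []
--     for s in child_steps:
--         st = ''
--         try:
--             st = str(s.get('status', '') or '').lower()
--         except Exception:
--             st = ''
--         child_statuses.append(st)
--     for p in priority:
--         if any(cs == p for cs in child_statuses):
--             return p
--     for cs in child_statuses:
--         if cs:
--             return cs
--     return None
-- ===== SOURCE B (Python) =====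
-- def compute_aggregated_status(child_steps):
--     if not child_steps:
--         return None
--     priority = ['failed', 'broken', 'skipped', 'passed', 'unknown']
--     rank = {p: i for i, p in enumerate(priority)}
--     best = None
--     first_nonempty = None
--     for s in child_steps:
--         try:
--             st = str(s.get('status', '') or '').lower()
--         except Exception:
--             st = ''
--         r = rank.get(st)
--         if r is not None and (best is None or r < best):
--             best = r
--         if first_nonempty is None and st:
--             first_nonempty = st
--     if best is not None:
--         return priority[best]
--     return first_nonempty
-- ===== Notes on version B (the rewrite author's own statement) =====
-- stated objective: simpler
-- what changed: Replaces A's three sequential scans (materialize the status list, re-scan it once per priority level, then re-scan for the first non-empty status) with a single pass over child_steps that maintains the minimum priority rank via a precomputed rank dict and, separately, the first non-empty status.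
import Mathlib
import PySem

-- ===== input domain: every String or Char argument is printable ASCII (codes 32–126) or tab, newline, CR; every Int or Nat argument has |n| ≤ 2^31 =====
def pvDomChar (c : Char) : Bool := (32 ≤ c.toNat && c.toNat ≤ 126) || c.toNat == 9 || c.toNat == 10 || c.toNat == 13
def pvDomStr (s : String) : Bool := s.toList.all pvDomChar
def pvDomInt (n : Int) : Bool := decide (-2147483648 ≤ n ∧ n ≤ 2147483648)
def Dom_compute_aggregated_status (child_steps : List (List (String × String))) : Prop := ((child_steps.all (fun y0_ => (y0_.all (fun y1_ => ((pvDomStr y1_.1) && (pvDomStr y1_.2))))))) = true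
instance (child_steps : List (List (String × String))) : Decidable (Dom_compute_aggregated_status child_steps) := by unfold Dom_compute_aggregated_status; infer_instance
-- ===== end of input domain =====

-- B replaces A's three sequential scans (build the status list, scan it once per priority,
-- rescan it for the first non-empty status) by a single pass over child_steps that maintains
-- the best priority rank and the first non-empty status; objective: simpler.

-- ===== PORT A =====
-- st = str(s.get('status','') or '').lower()  (dict = assoc list, first match; 'or '''' is the
-- identity here since lower('') = ''); shared by both ports as in both Python sources
def pvStatusOf (s : List (String × String)) : String :=
  PySem.Str.lower (((s.find? (fun kv => kv.1 == "status")).map Prod.snd).getD "")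

def compute_aggregated_status (child_steps : List (List (String × String))) : Option String :=
  if child_steps = [] then none
  else
    let priority : List String := ["failed", "broken", "skipped", "passed", "unknown"]
    let child_statuses := child_steps.foldl (fun acc s => acc ++ [pvStatusOf s]) []
    match priority.find? (fun p => child_statuses.any (fun cs => cs == p)) with
    | some p => some p
    | none => child_statuses.find? (fun cs => !(cs == ""))

-- ===== PORT B =====
-- rank = {p: i for i, p in enumerate(priority)}
def pvRank : List (String × Nat) :=
  [("failed", 0), ("broken", 1), ("skipped", 2), ("passed", 3), ("unknown", 4)]

-- one loop iteration of B: r = rank.get(st); update best and first_nonempty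
def pvStep (acc : Option Nat × Option String) (s : List (String × String)) :
    Option Nat × Option String :=
  let st := pvStatusOf s
  let r := (pvRank.find? (fun kv => kv.1 == st)).map Prod.snd
  let best := match r, acc.1 with
    | some r, none => some r
    | some r, some b => if r < b then some r else some b
    | none, b => b
  let fne := if acc.2 = none ∧ st ≠ "" then some st else acc.2
  (best, fne)

def compute_aggregated_status_alt (child_steps : List (List (String × String))) : Option String :=
  if child_steps = [] then none
  else
    let priority : List String := ["failed", "broken", "skipped", "passed", "unknown"]
    let res := child_steps.foldl pvStep (none, none)
    match res.1 with
    | some b => priority[b]?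
    | none => res.2

-- ===== PRECONDITION & SPEC =====
def Spec_compute_aggregated_status (child_steps : List (List (String × String))) (out : Option String) : Prop := out = compute_aggregated_status_alt child_steps
instance (child_steps : List (List (String × String))) (out : Option String) : Decidable (Spec_compute_aggregated_status child_steps out) := by unfold Spec_compute_aggregated_status; infer_instance

-- ===== CLAIM (what is proved, stated in full; the proofs are below) =====
def Claim_equal_compute_aggregated_status : Prop := ∀ (child_steps : List (List (String × String))), Dom_compute_aggregated_status child_steps → Spec_compute_aggregated_status child_steps (compute_aggregated_status child_steps)

-- ===== LEMMAS AND PROOFS =====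

-- the combine of best ranks performed by pvStep on the first component (min with none-identity)
def pvComb (b r : Option Nat) : Option Nat :=
  match r, b with
  | some r, none => some r
  | some r, some b => if r < b then some r else some b
  | none, b => b

-- the first-nonempty combine performed by pvStep on the second component
def pvOrE (a b : Option String) : Option String :=
  match a with
  | some x => some x
  | none => b

def pvRankOf (x : String) : Option Nat :=
  (pvRank.find? (fun kv => kv.1 == x)).map Prod.snd

-- minimum rank over the statuses of a list of steps
def pvMR : List (List (String × String)) → Option Nat
  | [] => none
  | s :: t => pvComb (pvRankOf (pvStatusOf s)) (pvMR t)

-- first non-empty status of a list of steps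
def pvFE : List (List (String × String)) → Option String
  | [] => none
  | s :: t => pvOrE (if pvStatusOf s ≠ "" then some (pvStatusOf s) else none) (pvFE t)

theorem pvComb_none_left (x : Option Nat) : pvComb none x = x := by cases x <;> rfl

theorem pvComb_none_right (x : Option Nat) : pvComb x none = x := by cases x <;> rfl

theorem pvComb_some (a b : Nat) : pvComb (some a) (some b) = some (min b a) := by
  simp only [pvComb]; split_ifs <;> simp only [Option.some.injEq] <;> omega

theorem pvComb_assoc (a b c : Option Nat) : pvComb (pvComb a b) c = pvComb a (pvComb b c) := by
  rcases a with _ | a <;> rcases b with _ | b <;> rcases c with _ | c <;>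
    simp only [pvComb_none_left, pvComb_none_right, pvComb_some, Option.some.injEq] <;>
    omega

theorem pvOrE_assoc (a b c : Option String) : pvOrE (pvOrE a b) c = pvOrE a (pvOrE b c) := by
  rcases a with _ | a <;> simp [pvOrE]

theorem pvStep_eq (acc : Option Nat × Option String) (s : List (String × String)) :
    pvStep acc s = (pvComb acc.1 (pvRankOf (pvStatusOf s)),
                    pvOrE acc.2 (if pvStatusOf s ≠ "" then some (pvStatusOf s) else none)) := by
  rcases acc with ⟨b, f⟩
  simp only [pvStep, pvComb, pvOrE, pvRankOf]
  rcases h : (pvRank.find? (fun kv => kv.1 == pvStatusOf s)).map Prod.snd with _ | r <;>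
    rcases b with _ | b <;> rcases f with _ | f <;>
    simp <;> split_ifs <;> simp_all

theorem foldl_pvStep (l : List (List (String × String))) :
    ∀ (b0 : Option Nat) (f0 : Option String),
      l.foldl pvStep (b0, f0) = (pvComb b0 (pvMR l), pvOrE f0 (pvFE l)) := by
  induction l with
  | nil => intro b0 f0; cases f0 <;> rfl
  | cons s t ih =>
    intro b0 f0
    rw [List.foldl_cons, pvStep_eq, ih]
    simp only [pvMR, pvFE, pvComb_assoc, pvOrE_assoc]

theorem pvRankOf_eq (x : String) : pvRankOf x =
    if "failed" = x then some 0 else if "broken" = x then some 1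
    else if "skipped" = x then some 2 else if "passed" = x then some 3
    else if "unknown" = x then some 4 else none := by
  by_cases h0 : "failed" = x
  · subst h0; decide
  by_cases h1 : "broken" = x
  · subst h1; decide
  by_cases h2 : "skipped" = x
  · subst h2; decide
  by_cases h3 : "passed" = x
  · subst h3; decide
  by_cases h4 : "unknown" = x
  · subst h4; decide
  have e0 : ("failed" == x) = false := by simp [h0]
  have e1 : ("broken" == x) = false := by simp [h1]
  have e2 : ("skipped" == x) = false := by simp [h2]
  have e3 : ("passed" == x) = false := by simp [h3]
  have e4 : ("unknown" == x) = false := by simp [h4]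
  simp [pvRankOf, pvRank, List.find?, e0, e1, e2, e3, e4, h0, h1, h2, h3, h4]

theorem pvFE_eq (l : List (List (String × String))) :
    pvFE l = (l.map pvStatusOf).find? (fun cs => !(cs == "")) := by
  induction l with
  | nil => simp [pvFE]
  | cons s t ih =>
    by_cases h : pvStatusOf s = "" <;> simp [pvFE, pvOrE, List.find?, h, ih]

theorem pvMR_eq (l : List (List (String × String))) :
    pvMR l =
      if (l.map pvStatusOf).any (fun c => c == "failed") then some 0
      else if (l.map pvStatusOf).any (fun c => c == "broken") then some 1
      else if (l.map pvStatusOf).any (fun c => c == "skipped") then some 2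
      else if (l.map pvStatusOf).any (fun c => c == "passed") then some 3
      else if (l.map pvStatusOf).any (fun c => c == "unknown") then some 4
      else none := by
  induction l with
  | nil => simp [pvMR]
  | cons s t ih =>
    simp only [pvMR, List.map_cons, List.any_cons]
    rw [ih, pvRankOf_eq]
    by_cases h0 : "failed" = pvStatusOf s
    · simp [← h0, pvComb_some, pvComb_none_right]
      split_ifs <;> simp only [pvComb_some, pvComb_none_right, Option.some.injEq] <;> omega
    by_cases h1 : "broken" = pvStatusOf s
    · simp [← h1, h0, Ne.symm h0]
      split_ifs <;> simp only [pvComb_some, pvComb_none_right, Option.some.injEq] <;> omega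
    by_cases h2 : "skipped" = pvStatusOf s
    · simp [← h2, h0, Ne.symm h0, h1, Ne.symm h1]
      split_ifs <;> simp only [pvComb_some, pvComb_none_right, Option.some.injEq] <;> omega
    by_cases h3 : "passed" = pvStatusOf s
    · simp [← h3, h0, Ne.symm h0, h1, Ne.symm h1, h2, Ne.symm h2]
      split_ifs <;> simp only [pvComb_some, pvComb_none_right, Option.some.injEq] <;> omega
    by_cases h4 : "unknown" = pvStatusOf s
    · simp [← h4, h0, Ne.symm h0, h1, Ne.symm h1, h2, Ne.symm h2, h3, Ne.symm h3]
      split_ifs <;> simp only [pvComb_some, pvComb_none_right, Option.some.injEq] <;> omega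
    simp [h0, Ne.symm h0, h1, Ne.symm h1, h2, Ne.symm h2, h3, Ne.symm h3, h4, Ne.symm h4,
      pvComb_none_left]

-- ===== VERDICT (by name: the statement is the Claim_ definition above) =====
theorem compute_aggregated_status_spec : Claim_equal_compute_aggregated_status := by
  intro cs _
  unfold Spec_compute_aggregated_status compute_aggregated_status compute_aggregated_status_alt
  by_cases hnil : cs = []
  · simp [hnil]
  · simp only [hnil, if_false]
    rw [PySem.List.foldl_append_singleton_eq_map, foldl_pvStep]
    simp only [pvComb_none_left, pvOrE, List.nil_append]
    rw [pvMR_eq, pvFE_eq]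
    simp only [List.any_map, List.find?]
    split_ifs <;> simp_all only [Bool.not_eq_true] <;> rfl
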